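-- pv_equiv track=rewrite | github.com/mikekono/gameboy-emulator | get_opcode.py | create_operand_table
-- ===== SOURCE A (Python) =====
-- def create_operand_table(table, table_name):
--     s = '#define ' + table_name + ' '
--     for operand in table:
--         if (table[operand] == 'A'):
--             s += 'reg.pA'
--         elif (table[operand] == 'B'):
--             s += 'reg.pB'
--         elif (table[operand] in ['C', '(C)']):
--             s += 'reg.pC'
--         elif (table[operand] == 'D'):
--             s += 'reg.pD'
--         elif (table[operand] == 'E'):
--             s += 'reg.pE'
--         elif (table[operand] == 'F'):
--             s += 'reg.pF'
--         elif (table[operand] == 'H'):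
--             s += 'reg.pH'
--         elif (table[operand] == 'L'):
--             s += 'reg.pL'
--         elif ('AF' in table[operand]):
--             s += '(unsigned char *) reg.pAF'
--         elif ('BC' in table[operand]):
--             s += '(unsigned char *) reg.pBC'
--         elif ('DE' in table[operand]):
--             s += '(unsigned char *) reg.pDE'
--         elif ('HL' in table[operand]):
--             s += '(unsigned char *) reg.pHL'
--         elif ('SP' in table[operand]):
--             s += '(unsigned char *) reg.pSP'
--         elif ( table[operand] in ['0', '1', '2', '3', '4', '5', '6', '7']):
--             s = s + '&const_int_table[' + table[operand] + ']'
--         elif ( table[operand] in ['00H', '08H', '10H', '18H', '20H', '28H', '30H', '38H']):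
--             if (table[operand] == '00H'):
--                 n = 0
--             elif (table[operand] == '08H'):
--                 n = 8
--             elif (table[operand] == '10H'):
--                 n = 9
--             elif (table[operand] == '18H'):
--                 n = 10
--             elif (table[operand] == '20H'):
--                 n = 11
--             elif (table[operand] == '28H'):
--                 n = 12
--             elif (table[operand] == '30H'):
--                 n = 13
--             elif (table[operand] == '38H'):
--                 n = 14
--             s += '&const_int_table[' + str(n) + ']'
--         elif ('JP_' in table[operand]):
--             s = s + '&const_int_table[' + table[operand] + ']'
--         else:
--             s += 'NULL'
--         if (operand != (len(table) - 1)):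
--             s += ', '
--         else:
--             s += '\n\n'
--     return s
-- ===== SOURCE B (Python) =====
-- # Rule-major staged passes: instead of classifying each entry through a decision
-- # chain, B sweeps the whole value list once per rule, filling an array of fragments.
--
-- _EXACT_RULES = [
--     ('A', 'reg.pA'), ('B', 'reg.pB'), ('C', 'reg.pC'), ('(C)', 'reg.pC'),
--     ('D', 'reg.pD'), ('E', 'reg.pE'), ('F', 'reg.pF'), ('H', 'reg.pH'), ('L', 'reg.pL'),
--     ('0', '&const_int_table[0]'), ('1', '&const_int_table[1]'),
--     ('2', '&const_int_table[2]'), ('3', '&const_int_table[3]'),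
--     ('4', '&const_int_table[4]'), ('5', '&const_int_table[5]'),
--     ('6', '&const_int_table[6]'), ('7', '&const_int_table[7]'),
--     ('00H', '&const_int_table[0]'), ('08H', '&const_int_table[8]'),
--     ('10H', '&const_int_table[9]'), ('18H', '&const_int_table[10]'),
--     ('20H', '&const_int_table[11]'), ('28H', '&const_int_table[12]'),
--     ('30H', '&const_int_table[13]'), ('38H', '&const_int_table[14]'),
-- ]
--
-- _SUB_RULES = [
--     ('AF', '(unsigned char *) reg.pAF'),
--     ('BC', '(unsigned char *) reg.pBC'),
--     ('DE', '(unsigned char *) reg.pDE'),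
--     ('HL', '(unsigned char *) reg.pHL'),
--     ('SP', '(unsigned char *) reg.pSP'),
-- ]
--
--
-- def _apply_pass(frags, vals, rules, match):
--     # one sweep over ALL entries per rule; earlier rules win (later sweeps only
--     # touch still-unresolved slots)
--     for probe, out in rules:
--         frags = [out if f is None and match(probe, v) else f
--                  for f, v in zip(frags, vals)]
--     return frags
--
--
-- def create_operand_table(table, table_name):
--     keys = list(table)
--     vals = [table[k] for k in keys]
--     frags = [None] * len(vals)
--     frags = _apply_pass(frags, vals, _EXACT_RULES, lambda p, v: p == v)
--     frags = _apply_pass(frags, vals, _SUB_RULES, lambda p, v: p in v)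
--     frags = [('&const_int_table[' + v + ']' if 'JP_' in v else 'NULL')
--              if f is None else f
--              for f, v in zip(frags, vals)]
--     last = len(keys) - 1
--     return '#define ' + table_name + ' ' + ''.join(
--         f + ('\n\n' if k == last else ', ') for f, k in zip(frags, keys))
-- ===== Notes on version B (the rewrite author's own statement) =====
-- stated objective: alternative
-- what changed: A classifies each entry through one 17-branch if/elif chain in a single pass; B transposes the traversal to rule-major staged passes: it first extracts the value list, then for each of 25 exact-match rules and 5 substring rules makes one sweep over a fragments array filling still-unresolved slots (earlier rules win), a final sweep resolves JP_/NULL, and the result is assembled by joining fragments with per-key separators.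
import Mathlib
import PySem

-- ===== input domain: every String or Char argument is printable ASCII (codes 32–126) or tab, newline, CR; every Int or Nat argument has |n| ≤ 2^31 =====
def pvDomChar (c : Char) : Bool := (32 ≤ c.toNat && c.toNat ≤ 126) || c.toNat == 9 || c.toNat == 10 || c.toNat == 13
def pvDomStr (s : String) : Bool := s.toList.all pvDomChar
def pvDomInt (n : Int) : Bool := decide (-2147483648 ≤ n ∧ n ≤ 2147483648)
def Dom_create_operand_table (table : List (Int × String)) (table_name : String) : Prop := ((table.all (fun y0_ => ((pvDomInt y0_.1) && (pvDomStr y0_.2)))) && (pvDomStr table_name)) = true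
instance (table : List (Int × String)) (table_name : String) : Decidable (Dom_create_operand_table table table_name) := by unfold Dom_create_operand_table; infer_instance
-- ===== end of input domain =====

-- B replaces A's per-entry 17-branch chain by rule-major staged passes over a
-- fragments array (one sweep per rule, earlier rules win), then joins; objective: alternative.

-- ===== PORT A =====
-- literal transliteration of A's loop: for each key, the if/elif chain appends to s
def create_operand_table (table : List (Int × String)) (table_name : String) : String :=
  let d := PySem.Dict.ofList table
  d.keys.foldl (fun s operand =>
    let v := d.getD operand ""
    let s :=
      if v = "A" then s ++ "reg.pA"
      else if v = "B" then s ++ "reg.pB"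
      else if v ∈ (["C", "(C)"] : List String) then s ++ "reg.pC"
      else if v = "D" then s ++ "reg.pD"
      else if v = "E" then s ++ "reg.pE"
      else if v = "F" then s ++ "reg.pF"
      else if v = "H" then s ++ "reg.pH"
      else if v = "L" then s ++ "reg.pL"
      else if PySem.Str.isIn "AF" v then s ++ "(unsigned char *) reg.pAF"
      else if PySem.Str.isIn "BC" v then s ++ "(unsigned char *) reg.pBC"
      else if PySem.Str.isIn "DE" v then s ++ "(unsigned char *) reg.pDE"
      else if PySem.Str.isIn "HL" v then s ++ "(unsigned char *) reg.pHL"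
      else if PySem.Str.isIn "SP" v then s ++ "(unsigned char *) reg.pSP"
      else if v ∈ (["0", "1", "2", "3", "4", "5", "6", "7"] : List String) then
        s ++ "&const_int_table[" ++ v ++ "]"
      else if v ∈ (["00H", "08H", "10H", "18H", "20H", "28H", "30H", "38H"] : List String) then
        let n : Int :=
          if v = "00H" then 0
          else if v = "08H" then 8
          else if v = "10H" then 9
          else if v = "18H" then 10
          else if v = "20H" then 11
          else if v = "28H" then 12
          else if v = "30H" then 13
          else 14
        s ++ "&const_int_table[" ++ PySem.Int.toStr n ++ "]"
      else if PySem.Str.isIn "JP_" v then s ++ "&const_int_table[" ++ v ++ "]"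
      else s ++ "NULL"
    if operand ≠ (d.size : Int) - 1 then s ++ ", " else s ++ "\n\n")
    ("#define " ++ table_name ++ " ")

-- ===== PORT B =====
-- B's _EXACT_RULES list, in order
def pvExact : List (String × String) :=
  [("A", "reg.pA"), ("B", "reg.pB"), ("C", "reg.pC"), ("(C)", "reg.pC"),
   ("D", "reg.pD"), ("E", "reg.pE"), ("F", "reg.pF"), ("H", "reg.pH"), ("L", "reg.pL"),
   ("0", "&const_int_table[0]"), ("1", "&const_int_table[1]"),
   ("2", "&const_int_table[2]"), ("3", "&const_int_table[3]"),
   ("4", "&const_int_table[4]"), ("5", "&const_int_table[5]"),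
   ("6", "&const_int_table[6]"), ("7", "&const_int_table[7]"),
   ("00H", "&const_int_table[0]"), ("08H", "&const_int_table[8]"),
   ("10H", "&const_int_table[9]"), ("18H", "&const_int_table[10]"),
   ("20H", "&const_int_table[11]"), ("28H", "&const_int_table[12]"),
   ("30H", "&const_int_table[13]"), ("38H", "&const_int_table[14]")]

-- B's _SUB_RULES list, in order
def pvSubs : List (String × String) :=
  [("AF", "(unsigned char *) reg.pAF"), ("BC", "(unsigned char *) reg.pBC"),
   ("DE", "(unsigned char *) reg.pDE"), ("HL", "(unsigned char *) reg.pHL"),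
   ("SP", "(unsigned char *) reg.pSP")]

-- B's _apply_pass: one sweep over all entries per rule, filling unresolved slots
def pvPass (m : String → String → Bool) (frags : List (Option String))
    (vals : List String) (rules : List (String × String)) : List (Option String) :=
  rules.foldl (fun fr rule =>
    (fr.zip vals).map (fun fv =>
      if fv.1.isNone && m rule.1 fv.2 then some rule.2 else fv.1)) frags

def create_operand_table_alt (table : List (Int × String)) (table_name : String) : String :=
  let d := PySem.Dict.ofList table
  let keys := d.keys
  let vals := keys.map (fun k => d.getD k "")
  let frags0 : List (Option String) := vals.map (fun _ => none)
  let frags1 := pvPass (fun p v => p == v) frags0 vals pvExact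
  let frags2 := pvPass (fun p v => PySem.Str.isIn p v) frags1 vals pvSubs
  let frags3 := (frags2.zip vals).map (fun fv =>
    match fv.1 with
    | some f => f
    | none => if PySem.Str.isIn "JP_" fv.2 then "&const_int_table[" ++ fv.2 ++ "]" else "NULL")
  let last := (d.size : Int) - 1
  "#define " ++ table_name ++ " " ++
    PySem.Str.join "" ((frags3.zip keys).map (fun fk =>
      fk.1 ++ (if fk.2 = last then "\n\n" else ", ")))

-- ===== PRECONDITION & SPEC =====
def Spec_create_operand_table (table : List (Int × String)) (table_name : String) (out : String) : Prop := out = create_operand_table_alt table table_name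
instance (table : List (Int × String)) (table_name : String) (out : String) : Decidable (Spec_create_operand_table table table_name out) := by unfold Spec_create_operand_table; infer_instance

-- ===== CLAIM (what is proved, stated in full; the proofs are below) =====
def Claim_equal_create_operand_table : Prop := ∀ (table : List (Int × String)) (table_name : String), Dom_create_operand_table table table_name → Spec_create_operand_table table table_name (create_operand_table table table_name)

-- ===== LEMMAS AND PROOFS =====

-- the fragment each entry ends with (proof-side characterisation of B's passes):
-- first exact rule, else first substring rule, else JP_, else NULL
def pvFrag (v : String) : String :=
  match List.lookup v pvExact with
  | some f => f
  | none =>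
    match pvSubs.find? (fun r => PySem.Str.isIn r.1 v) with
    | some r => r.2
    | none => if PySem.Str.isIn "JP_" v then "&const_int_table[" ++ v ++ "]" else "NULL"

-- ''.join: joining over "" peels one part at a time
theorem pv_join_empty_cons (x : String) (r : List String) :
    PySem.Str.join "" (x :: r) = x ++ PySem.Str.join "" r := by
  apply String.ext
  cases r with
  | nil => simp [PySem.Str.toList_join, PySem.Chars.join_singleton, PySem.Chars.join_nil]
  | cons y t => simp [PySem.Str.toList_join, PySem.Chars.join_cons_cons]

-- A's accumulator loop is the join of per-item pieces when every step appends one piece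
theorem pvFoldl_eq_join {α : Type} (f : String → α → String) (g : α → String)
    (hf : ∀ s a, f s a = s ++ g a) :
    ∀ (l : List α) (s : String), l.foldl f s = s ++ PySem.Str.join "" (l.map g) := by
  intro l
  induction l with
  | nil =>
    intro s
    apply String.ext
    simp [PySem.Str.toList_join, PySem.Chars.join_nil]
  | cons a t ih =>
    intro s
    rw [List.foldl_cons, hf, ih, List.map_cons, pv_join_empty_cons, String.append_assoc]

-- A's if/elif chain, as a pure fragment function of the operand string (proof helper)
def pvChain (v : String) : String :=
  if v = "A" then "reg.pA"
  else if v = "B" then "reg.pB"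
  else if v ∈ (["C", "(C)"] : List String) then "reg.pC"
  else if v = "D" then "reg.pD"
  else if v = "E" then "reg.pE"
  else if v = "F" then "reg.pF"
  else if v = "H" then "reg.pH"
  else if v = "L" then "reg.pL"
  else if PySem.Str.isIn "AF" v then "(unsigned char *) reg.pAF"
  else if PySem.Str.isIn "BC" v then "(unsigned char *) reg.pBC"
  else if PySem.Str.isIn "DE" v then "(unsigned char *) reg.pDE"
  else if PySem.Str.isIn "HL" v then "(unsigned char *) reg.pHL"
  else if PySem.Str.isIn "SP" v then "(unsigned char *) reg.pSP"
  else if v ∈ (["0", "1", "2", "3", "4", "5", "6", "7"] : List String) then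
    "&const_int_table[" ++ v ++ "]"
  else if v ∈ (["00H", "08H", "10H", "18H", "20H", "28H", "30H", "38H"] : List String) then
    let n : Int :=
      if v = "00H" then 0
      else if v = "08H" then 8
      else if v = "10H" then 9
      else if v = "18H" then 10
      else if v = "20H" then 11
      else if v = "28H" then 12
      else if v = "30H" then 13
      else 14
    "&const_int_table[" ++ PySem.Int.toStr n ++ "]"
  else if PySem.Str.isIn "JP_" v then "&const_int_table[" ++ v ++ "]"
  else "NULL"

-- A's chain and B's staged dispatch choose the same fragment for every operand string
theorem pvChain_eq_pvFrag (v : String) : pvChain v = pvFrag v := by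
  by_cases h1 : v = "A"
  · subst h1; decide
  by_cases h2 : v = "B"
  · subst h2; decide
  by_cases h3 : v = "C"
  · subst h3; decide
  by_cases h4 : v = "(C)"
  · subst h4; decide
  by_cases h5 : v = "D"
  · subst h5; decide
  by_cases h6 : v = "E"
  · subst h6; decide
  by_cases h7 : v = "F"
  · subst h7; decide
  by_cases h8 : v = "H"
  · subst h8; decide
  by_cases h9 : v = "L"
  · subst h9; decide
  by_cases h10 : v = "0"
  · subst h10; decide
  by_cases h11 : v = "1"
  · subst h11; decide
  by_cases h12 : v = "2"
  · subst h12; decide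
  by_cases h13 : v = "3"
  · subst h13; decide
  by_cases h14 : v = "4"
  · subst h14; decide
  by_cases h15 : v = "5"
  · subst h15; decide
  by_cases h16 : v = "6"
  · subst h16; decide
  by_cases h17 : v = "7"
  · subst h17; decide
  by_cases h18 : v = "00H"
  · subst h18; decide
  by_cases h19 : v = "08H"
  · subst h19; decide
  by_cases h20 : v = "10H"
  · subst h20; decide
  by_cases h21 : v = "18H"
  · subst h21; decide
  by_cases h22 : v = "20H"
  · subst h22; decide
  by_cases h23 : v = "28H"
  · subst h23; decide
  by_cases h24 : v = "30H"
  · subst h24; decide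
  by_cases h25 : v = "38H"
  · subst h25; decide
  have hlk : List.lookup v pvExact = none := by
    simp [pvExact, List.lookup, beq_eq_false_iff_ne.2 h1, beq_eq_false_iff_ne.2 h2, beq_eq_false_iff_ne.2 h3, beq_eq_false_iff_ne.2 h4, beq_eq_false_iff_ne.2 h5, beq_eq_false_iff_ne.2 h6, beq_eq_false_iff_ne.2 h7, beq_eq_false_iff_ne.2 h8, beq_eq_false_iff_ne.2 h9, beq_eq_false_iff_ne.2 h10, beq_eq_false_iff_ne.2 h11, beq_eq_false_iff_ne.2 h12, beq_eq_false_iff_ne.2 h13, beq_eq_false_iff_ne.2 h14, beq_eq_false_iff_ne.2 h15, beq_eq_false_iff_ne.2 h16, beq_eq_false_iff_ne.2 h17, beq_eq_false_iff_ne.2 h18, beq_eq_false_iff_ne.2 h19, beq_eq_false_iff_ne.2 h20, beq_eq_false_iff_ne.2 h21, beq_eq_false_iff_ne.2 h22, beq_eq_false_iff_ne.2 h23, beq_eq_false_iff_ne.2 h24, beq_eq_false_iff_ne.2 h25]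
  by_cases hAF : PySem.Chars.isIn ['A', 'F'] v.toList = true
  · simp [pvChain, pvFrag, hlk, pvSubs, hAF, h1, h2, h3, h4, h5, h6, h7, h8, h9]
  by_cases hBC : PySem.Chars.isIn ['B', 'C'] v.toList = true
  · simp [pvChain, pvFrag, hlk, pvSubs, hBC, h1, h2, h3, h4, h5, h6, h7, h8, h9, hAF]
  by_cases hDE : PySem.Chars.isIn ['D', 'E'] v.toList = true
  · simp [pvChain, pvFrag, hlk, pvSubs, hDE, h1, h2, h3, h4, h5, h6, h7, h8, h9, hAF, hBC]
  by_cases hHL : PySem.Chars.isIn ['H', 'L'] v.toList = true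
  · simp [pvChain, pvFrag, hlk, pvSubs, hHL, h1, h2, h3, h4, h5, h6, h7, h8, h9, hAF, hBC, hDE]
  by_cases hSP : PySem.Chars.isIn ['S', 'P'] v.toList = true
  · simp [pvChain, pvFrag, hlk, pvSubs, hSP, h1, h2, h3, h4, h5, h6, h7, h8, h9, hAF, hBC, hDE, hHL]
  by_cases hJP : PySem.Chars.isIn ['J', 'P', '_'] v.toList = true
  · simp [pvChain, pvFrag, hlk, pvSubs, hJP, h1, h2, h3, h4, h5, h6, h7, h8, h9, h10, h11, h12, h13, h14, h15, h16, h17, h18, h19, h20, h21, h22, h23, h24, h25, hAF, hBC, hDE, hHL, hSP]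
  simp [pvChain, pvFrag, hlk, pvSubs, h1, h2, h3, h4, h5, h6, h7, h8, h9, h10, h11, h12, h13, h14, h15, h16, h17, h18, h19, h20, h21, h22, h23, h24, h25, hAF, hBC, hDE, hHL, hSP, hJP]

-- the chain with 's +=' in every branch appends pvChain v to s
theorem pvChain_app (s v : String) :
    (if v = "A" then s ++ "reg.pA"
     else if v = "B" then s ++ "reg.pB"
     else if v ∈ (["C", "(C)"] : List String) then s ++ "reg.pC"
     else if v = "D" then s ++ "reg.pD"
     else if v = "E" then s ++ "reg.pE"
     else if v = "F" then s ++ "reg.pF"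
     else if v = "H" then s ++ "reg.pH"
     else if v = "L" then s ++ "reg.pL"
     else if PySem.Str.isIn "AF" v then s ++ "(unsigned char *) reg.pAF"
     else if PySem.Str.isIn "BC" v then s ++ "(unsigned char *) reg.pBC"
     else if PySem.Str.isIn "DE" v then s ++ "(unsigned char *) reg.pDE"
     else if PySem.Str.isIn "HL" v then s ++ "(unsigned char *) reg.pHL"
     else if PySem.Str.isIn "SP" v then s ++ "(unsigned char *) reg.pSP"
     else if v ∈ (["0", "1", "2", "3", "4", "5", "6", "7"] : List String) then
       s ++ "&const_int_table[" ++ v ++ "]"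
     else if v ∈ (["00H", "08H", "10H", "18H", "20H", "28H", "30H", "38H"] : List String) then
       let n : Int :=
         if v = "00H" then 0
         else if v = "08H" then 8
         else if v = "10H" then 9
         else if v = "18H" then 10
         else if v = "20H" then 11
         else if v = "28H" then 12
         else if v = "30H" then 13
         else 14
       s ++ "&const_int_table[" ++ PySem.Int.toStr n ++ "]"
     else if PySem.Str.isIn "JP_" v then s ++ "&const_int_table[" ++ v ++ "]"
     else s ++ "NULL")
    = s ++ pvChain v := by
  unfold pvChain
  simp only [apply_ite (fun t => s ++ t), String.append_assoc]

-- one iteration of A's loop appends the fragment and separator for that key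
theorem pvBody (d : PySem.Dict Int String) (s : String) (k : Int) :
    (fun s operand =>
      let v := d.getD operand ""
      let s :=
        if v = "A" then s ++ "reg.pA"
        else if v = "B" then s ++ "reg.pB"
        else if v ∈ (["C", "(C)"] : List String) then s ++ "reg.pC"
        else if v = "D" then s ++ "reg.pD"
        else if v = "E" then s ++ "reg.pE"
        else if v = "F" then s ++ "reg.pF"
        else if v = "H" then s ++ "reg.pH"
        else if v = "L" then s ++ "reg.pL"
        else if PySem.Str.isIn "AF" v then s ++ "(unsigned char *) reg.pAF"
        else if PySem.Str.isIn "BC" v then s ++ "(unsigned char *) reg.pBC"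
        else if PySem.Str.isIn "DE" v then s ++ "(unsigned char *) reg.pDE"
        else if PySem.Str.isIn "HL" v then s ++ "(unsigned char *) reg.pHL"
        else if PySem.Str.isIn "SP" v then s ++ "(unsigned char *) reg.pSP"
        else if v ∈ (["0", "1", "2", "3", "4", "5", "6", "7"] : List String) then
          s ++ "&const_int_table[" ++ v ++ "]"
        else if v ∈ (["00H", "08H", "10H", "18H", "20H", "28H", "30H", "38H"] : List String) then
          let n : Int :=
            if v = "00H" then 0
            else if v = "08H" then 8
            else if v = "10H" then 9
            else if v = "18H" then 10
            else if v = "20H" then 11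
            else if v = "28H" then 12
            else if v = "30H" then 13
            else 14
          s ++ "&const_int_table[" ++ PySem.Int.toStr n ++ "]"
        else if PySem.Str.isIn "JP_" v then s ++ "&const_int_table[" ++ v ++ "]"
        else s ++ "NULL"
      if operand ≠ (d.size : Int) - 1 then s ++ ", " else s ++ "\n\n") s k
    = s ++ (pvFrag (d.getD k "") ++ (if k = (d.size : Int) - 1 then "\n\n" else ", ")) := by
  simp only []
  rw [pvChain_app, ← pvChain_eq_pvFrag]
  by_cases hk : k = (d.size : Int) - 1 <;> simp [hk, String.append_assoc]

-- zipping a mapped list with the original list pairs each element with its image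
theorem pvMapZipSelf {α β : Type} (f : α → β) :
    ∀ l : List α, (l.map f).zip l = l.map (fun a => (f a, a)) := by
  intro l; induction l with
  | nil => rfl
  | cons a t ih => simp [ih]

-- re-zipping a map of a zip with the second list keeps the second components
theorem pvZipMapZip {α β : Type} (g : α × β → α) :
    ∀ (frags : List α) (vals : List β),
      ((frags.zip vals).map g).zip vals = (frags.zip vals).map (fun fv => (g fv, fv.2)) := by
  intro frags
  induction frags with
  | nil => intro vals; rfl
  | cons a t ih =>
    intro vals
    cases vals with
    | nil => rfl
    | cons b vs => simp [ih]

-- B's rule-major sweeps act pointwise: each slot runs its own fold over the rules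
theorem pvPass_pointwise (m : String → String → Bool) :
    ∀ (rules : List (String × String)) (frags : List (Option String)) (vals : List String),
      frags.length = vals.length →
      pvPass m frags vals rules
        = (frags.zip vals).map (fun fv =>
            rules.foldl (fun f r => if f.isNone && m r.1 fv.2 then some r.2 else f) fv.1) := by
  intro rules
  induction rules with
  | nil =>
    intro frags vals h
    simp only [pvPass, List.foldl_nil]
    exact (List.map_fst_zip (l₁ := frags) (l₂ := vals) (le_of_eq h)).symm
  | cons r rs ih =>
    intro frags vals h
    have hstep : pvPass m frags vals (r :: rs)
        = pvPass m ((frags.zip vals).map (fun fv =>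
            if fv.1.isNone && m r.1 fv.2 then some r.2 else fv.1)) vals rs := rfl
    have h' : ((frags.zip vals).map (fun fv =>
        if fv.1.isNone && m r.1 fv.2 then some r.2 else fv.1)).length = vals.length := by
      simp [h]
    rw [hstep, ih _ vals h', pvZipMapZip, List.map_map]
    rfl

-- a filled slot is never overwritten by later rules
theorem pvFold_some (m : String → String → Bool) (v x : String) :
    ∀ rules : List (String × String),
      rules.foldl (fun f r => if f.isNone && m r.1 v then some r.2 else f) (some x) = some x := by
  intro rules; induction rules with
  | nil => rfl
  | cons r rs ih => rw [List.foldl_cons]; exact ih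

-- the exact-rule fold from an empty slot is association-list lookup
theorem pvFoldE_eq_lookup (v : String) :
    ∀ rules : List (String × String),
      rules.foldl (fun f r => if f.isNone && (r.1 == v) then some r.2 else f) none
        = List.lookup v rules := by
  intro rules; induction rules with
  | nil => rfl
  | cons r rs ih =>
    by_cases h : r.1 = v
    · have hb : ((Option.isNone (none : Option String)) && (r.1 == v)) = true := by simp [h]
      rw [List.foldl_cons, if_pos hb, pvFold_some (fun p w => p == w)]
      have hv : (v == r.1) = true := by simp [h]
      simp [List.lookup, hv]
    · have hb : ¬ (((Option.isNone (none : Option String)) && (r.1 == v)) = true) := by simp [h]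
      rw [List.foldl_cons, if_neg hb, ih]
      have hv : (v == r.1) = false := beq_eq_false_iff_ne.2 (fun e => h e.symm)
      simp [List.lookup, hv]

-- the substring-rule fold from an empty slot is the first matching rule
theorem pvFoldS_eq_find (v : String) :
    ∀ rules : List (String × String),
      rules.foldl (fun f r => if f.isNone && PySem.Str.isIn r.1 v then some r.2 else f) none
        = (rules.find? (fun r => PySem.Str.isIn r.1 v)).map Prod.snd := by
  intro rules; induction rules with
  | nil => rfl
  | cons r rs ih =>
    by_cases h : PySem.Str.isIn r.1 v = true
    · have hb : ((Option.isNone (none : Option String)) && PySem.Str.isIn r.1 v) = true := by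
        simpa using h
      have h' : PySem.Chars.isIn r.1.toList v.toList = true := by simpa using h
      rw [List.foldl_cons, if_pos hb, pvFold_some (fun p w => PySem.Str.isIn p w)]
      simp [List.find?, h']
    · have hb : ¬ (((Option.isNone (none : Option String)) && PySem.Str.isIn r.1 v) = true) := by
        simpa using h
      have h' : ¬ PySem.Chars.isIn r.1.toList v.toList = true := by simpa using h
      rw [List.foldl_cons, if_neg hb, ih]
      simp [List.find?, h']

-- one slot through all three stages yields pvFrag
theorem pvPoint (v : String) :
    (match pvSubs.foldl (fun f r => if f.isNone && PySem.Str.isIn r.1 v then some r.2 else f)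
        (pvExact.foldl (fun f r => if f.isNone && (r.1 == v) then some r.2 else f) none) with
     | some f => f
     | none => if PySem.Str.isIn "JP_" v then "&const_int_table[" ++ v ++ "]" else "NULL")
    = pvFrag v := by
  rw [pvFoldE_eq_lookup]
  unfold pvFrag
  cases hE : List.lookup v pvExact with
  | some x => rw [pvFold_some (fun p w => PySem.Str.isIn p w)]
  | none =>
    rw [pvFoldS_eq_find]
    cases hS : pvSubs.find? (fun r => PySem.Str.isIn r.1 v) with
    | some r => rfl
    | none => rfl

-- B's whole pipeline computes pvFrag at every slot
theorem pvStages (vals : List String) :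
    ((pvPass (fun p v => PySem.Str.isIn p v)
        (pvPass (fun p v => p == v) (vals.map (fun _ => none)) vals pvExact)
        vals pvSubs).zip vals).map (fun fv =>
      match fv.1 with
      | some f => f
      | none => if PySem.Str.isIn "JP_" fv.2 then "&const_int_table[" ++ fv.2 ++ "]" else "NULL")
    = vals.map pvFrag := by
  have e1 : pvPass (fun p v => p == v) (vals.map (fun _ => none)) vals pvExact
      = vals.map (fun v =>
          pvExact.foldl (fun f r => if f.isNone && (r.1 == v) then some r.2 else f) none) := by
    rw [pvPass_pointwise _ _ _ _ (by simp), pvMapZipSelf, List.map_map]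
    rfl
  have e2 : pvPass (fun p v => PySem.Str.isIn p v)
        (vals.map (fun v =>
          pvExact.foldl (fun f r => if f.isNone && (r.1 == v) then some r.2 else f) none))
        vals pvSubs
      = vals.map (fun v =>
          pvSubs.foldl (fun f r => if f.isNone && PySem.Str.isIn r.1 v then some r.2 else f)
            (pvExact.foldl (fun f r => if f.isNone && (r.1 == v) then some r.2 else f) none)) := by
    rw [pvPass_pointwise _ _ _ _ (by simp), pvMapZipSelf, List.map_map]
    rfl
  rw [e1, e2, pvMapZipSelf, List.map_map]
  apply List.map_congr_left
  intro v _
  exact pvPoint v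

-- ===== VERDICT (by name: the statement is the Claim_ definition above) =====
theorem create_operand_table_spec : Claim_equal_create_operand_table := by
  intro table table_name _
  show create_operand_table table table_name = create_operand_table_alt table table_name
  simp only [create_operand_table, create_operand_table_alt]
  rw [pvFoldl_eq_join _ _ (pvBody (PySem.Dict.ofList table)), pvStages, List.map_map,
      pvMapZipSelf, List.map_map]
  simp [Function.comp_def, String.append_assoc]
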